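-- pv_equiv track=rewrite | github.com/bwanyu1/risking_map | graphml_to_spikes.py | _classify_by_theme_labels
-- ===== SOURCE A (Python) =====
-- RISK_MILITARY = "MILITARY"
--
-- RISK_CIVIL_UNREST = "CIVIL_UNREST"
--
-- RISK_POLITICAL = "POLITICAL"
--
-- RISK_ECONOMIC = "ECONOMIC"
--
-- RISK_NATURAL_DISASTER = "NATURAL_DISASTER"
--
-- def _classify_by_theme_labels(theme_labels: list[str]) -> str | None:
--     """
--     Theme ノードのラベルに含まれるキーワードから分類。
--     GDELT の Theme は環境ごとに結構ブレるので、
--     必要に応じてキーワードを増やしていく想定。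
--     """
--     if not theme_labels:
--         return None
--
--     # 大文字にしてから判定
--     up = [t.upper() for t in theme_labels]
--
--     def contains_any(substrings: list[str]) -> bool:
--         return any(any(s in t for s in substrings) for t in up)
--
--     # 自然災害
--     if contains_any(
--         [
--             "NATURAL_DISASTER",
--             "EARTHQUAKE",
--             "FLOOD",
--             "TYPHOON",
--             "HURRICANE",
--             "TSUNAMI",
--             "WILDFIRE",
--             "LANDSLIDE",
--         ]
--     ):
--         return RISK_NATURAL_DISASTER
--
--     # 軍事 / 武力衝突
--     if contains_any(
--         [
--             "MILITARY",
--             "ARMEDCONFLICT",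
--             "WAR",
--             "INVASION",
--             "MISSILE",
--             "AIRSTRIKE",
--             "BOMBARD",
--         ]
--     ):
--         return RISK_MILITARY
--
--     # 抗議活動・ストライキ
--     if contains_any(
--         ["PROTEST", "DEMONSTRATION", "STRIKE", "RIOT", "MOBILIZATION"]
--     ):
--         return RISK_CIVIL_UNREST
--
--     # テロ / 政治暴力
--     if contains_any(["TERROR", "TERRORISM", "BOMBING", "INSURGENCY"]):
--         return RISK_MILITARY  # テロも広義の武力リスクとして扱う
--
--     # 政治・選挙・政権交代
--     if contains_any(
--         ["ELECTION", "GOVERNMENT", "COUP", "REGIME", "PARLIAMENT", "SANCTION"]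
--     ):
--         return RISK_POLITICAL
--
--     # 経済・制裁・貿易
--     if contains_any(["ECONOMY", "TRADE", "SANCTION", "TARIFF", "EXPORT", "IMPORT"]):
--         return RISK_ECONOMIC
--
--     return None
-- ===== SOURCE B (Python) =====
-- RISK_MILITARY = "MILITARY"
-- RISK_CIVIL_UNREST = "CIVIL_UNREST"
-- RISK_POLITICAL = "POLITICAL"
-- RISK_ECONOMIC = "ECONOMIC"
-- RISK_NATURAL_DISASTER = "NATURAL_DISASTER"
--
-- # priority-ordered category table (terror keywords map to MILITARY too)
-- _CATS = [
--     (RISK_NATURAL_DISASTER, ["NATURAL_DISASTER", "EARTHQUAKE", "FLOOD", "TYPHOON",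
--                              "HURRICANE", "TSUNAMI", "WILDFIRE", "LANDSLIDE"]),
--     (RISK_MILITARY, ["MILITARY", "ARMEDCONFLICT", "WAR", "INVASION", "MISSILE",
--                      "AIRSTRIKE", "BOMBARD"]),
--     (RISK_CIVIL_UNREST, ["PROTEST", "DEMONSTRATION", "STRIKE", "RIOT", "MOBILIZATION"]),
--     (RISK_MILITARY, ["TERROR", "TERRORISM", "BOMBING", "INSURGENCY"]),
--     (RISK_POLITICAL, ["ELECTION", "GOVERNMENT", "COUP", "REGIME", "PARLIAMENT", "SANCTION"]),
--     (RISK_ECONOMIC, ["ECONOMY", "TRADE", "SANCTION", "TARIFF", "EXPORT", "IMPORT"]),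
-- ]
--
-- def _classify_by_theme_labels(theme_labels):
--     if not theme_labels:
--         return None
--     best = None
--     for t in theme_labels:
--         u = t.upper()
--         for i, (_, kws) in enumerate(_CATS):
--             if any(k in u for k in kws):
--                 if best is None or i < best:
--                     best = i
--                 break
--     return _CATS[best][0] if best is not None else None
-- ===== Notes on version B (the rewrite author's own statement) =====
-- stated objective: alternative
-- what changed: Replaced A's six sequential contains_any passes over the whole label list by a priority-ordered category table scanned once per label with a break on first match, keeping the minimum category index across labels and looking the winner up in the table at the end.
import Mathlib
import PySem

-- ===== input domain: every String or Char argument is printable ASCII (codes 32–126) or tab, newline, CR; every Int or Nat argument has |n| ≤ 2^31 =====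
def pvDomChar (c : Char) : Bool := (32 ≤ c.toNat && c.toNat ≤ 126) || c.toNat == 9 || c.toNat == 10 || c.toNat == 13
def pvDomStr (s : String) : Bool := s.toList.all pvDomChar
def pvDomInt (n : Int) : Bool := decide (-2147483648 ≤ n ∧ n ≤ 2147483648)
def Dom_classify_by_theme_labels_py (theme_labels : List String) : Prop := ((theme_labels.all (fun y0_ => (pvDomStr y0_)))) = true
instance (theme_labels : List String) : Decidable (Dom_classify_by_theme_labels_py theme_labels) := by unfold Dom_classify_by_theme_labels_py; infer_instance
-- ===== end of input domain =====

-- B replaces A's six sequential keyword checks by a priority-ordered category table scanned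
-- once per label, keeping the minimum matching category index (objective: alternative decomposition).


-- ===== PORT A =====
def pvKwNat : List String := ["NATURAL_DISASTER", "EARTHQUAKE", "FLOOD", "TYPHOON", "HURRICANE", "TSUNAMI", "WILDFIRE", "LANDSLIDE"]
def pvKwMil : List String := ["MILITARY", "ARMEDCONFLICT", "WAR", "INVASION", "MISSILE", "AIRSTRIKE", "BOMBARD"]
def pvKwUnrest : List String := ["PROTEST", "DEMONSTRATION", "STRIKE", "RIOT", "MOBILIZATION"]
def pvKwTerror : List String := ["TERROR", "TERRORISM", "BOMBING", "INSURGENCY"]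
def pvKwPol : List String := ["ELECTION", "GOVERNMENT", "COUP", "REGIME", "PARLIAMENT", "SANCTION"]
def pvKwEcon : List String := ["ECONOMY", "TRADE", "SANCTION", "TARIFF", "EXPORT", "IMPORT"]

def pvContainsAny (up : List String) (subs : List String) : Bool :=
  up.any (fun t => subs.any (fun s => PySem.Str.isIn s t))

def classify_by_theme_labels_py (theme_labels : List String) : Option String :=
  if theme_labels = [] then none
  else
    let up := theme_labels.map PySem.Str.upper
    if pvContainsAny up pvKwNat then some "NATURAL_DISASTER"
    else if pvContainsAny up pvKwMil then some "MILITARY"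
    else if pvContainsAny up pvKwUnrest then some "CIVIL_UNREST"
    else if pvContainsAny up pvKwTerror then some "MILITARY"
    else if pvContainsAny up pvKwPol then some "POLITICAL"
    else if pvContainsAny up pvKwEcon then some "ECONOMIC"
    else none

-- ===== PORT B =====
def pvCats : List (String × List String) :=
  [("NATURAL_DISASTER", pvKwNat), ("MILITARY", pvKwMil), ("CIVIL_UNREST", pvKwUnrest),
   ("MILITARY", pvKwTerror), ("POLITICAL", pvKwPol), ("ECONOMIC", pvKwEcon)]

def pvCatMatch (u : String) (c : String × List String) : Bool :=
  c.2.any (fun k => PySem.Str.isIn k u)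

-- the inner enumerate-and-break loop of Source B: index of the first matching category
def pvFirstCat (u : String) : List (String × List String) → Option Nat
  | [] => none
  | c :: rest => if pvCatMatch u c then some 0 else (pvFirstCat u rest).map (· + 1)

-- one iteration of Source B's outer loop over labels (keep the minimum index seen)
def pvStep (best : Option Nat) (t : String) : Option Nat :=
  match pvFirstCat (PySem.Str.upper t) pvCats with
  | none => best
  | some i =>
    match best with
    | none => some i
    | some b => if i < b then some i else some b

def classify_by_theme_labels_py_alt (theme_labels : List String) : Option String :=
  if theme_labels = [] then none
  else
    match theme_labels.foldl pvStep none with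
    | none => none
    | some b => (PySem.List.pyGet? pvCats (b : Int)).map Prod.fst

-- ===== PRECONDITION & SPEC =====
def Spec_classify_by_theme_labels_py (theme_labels : List String) (out : Option String) : Prop := out = classify_by_theme_labels_py_alt theme_labels
instance (theme_labels : List String) (out : Option String) : Decidable (Spec_classify_by_theme_labels_py theme_labels out) := by unfold Spec_classify_by_theme_labels_py; infer_instance

-- ===== CLAIM (what is proved, stated in full; the proofs are below) =====
def Claim_equal_classify_by_theme_labels_py : Prop := ∀ (theme_labels : List String), Dom_classify_by_theme_labels_py theme_labels → Spec_classify_by_theme_labels_py theme_labels (classify_by_theme_labels_py theme_labels)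

-- ===== LEMMAS AND PROOFS =====

-- option-valued minimum (none = no match yet)
def pvOptMin (a b : Option Nat) : Option Nat :=
  match a, b with
  | none, b => b
  | some a, none => some a
  | some a, some b => some (min a b)

theorem pvStep_eq (best : Option Nat) (t : String) :
    pvStep best t = pvOptMin best (pvFirstCat (PySem.Str.upper t) pvCats) := by
  unfold pvStep pvOptMin
  cases pvFirstCat (PySem.Str.upper t) pvCats with
  | none => cases best <;> rfl
  | some i =>
    cases best with
    | none => rfl
    | some b => simp only []; split_ifs <;> simp [Nat.min_def] <;> omega

theorem pvOptMin_assoc (a b c : Option Nat) :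
    pvOptMin (pvOptMin a b) c = pvOptMin a (pvOptMin b c) := by
  cases a <;> cases b <;> cases c <;> simp [pvOptMin, Nat.min_assoc]

-- generic first-match-index scan, for reasoning about pvFirstCat with varying predicates
def pvFirstP (p : (String × List String) → Bool) : List (String × List String) → Option Nat
  | [] => none
  | c :: rest => if p c then some 0 else (pvFirstP p rest).map (· + 1)

theorem pvFirstCat_eq_firstP (u : String) (L : List (String × List String)) :
    pvFirstCat u L = pvFirstP (pvCatMatch u) L := by
  induction L with
  | nil => rfl
  | cons c rest ih => simp [pvFirstCat, pvFirstP, ih]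

theorem pvOptMin_map_succ (a b : Option Nat) :
    pvOptMin (a.map (· + 1)) (b.map (· + 1)) = (pvOptMin a b).map (· + 1) := by
  cases a <;> cases b <;> simp [pvOptMin, Nat.succ_min_succ]

theorem pvFirstP_disj (p q : (String × List String) → Bool) (L : List (String × List String)) :
    pvFirstP (fun c => p c || q c) L = pvOptMin (pvFirstP p L) (pvFirstP q L) := by
  induction L with
  | nil => rfl
  | cons c rest ih =>
    simp only [pvFirstP]
    by_cases hp : p c <;> by_cases hq : q c
    · simp [hp, hq, pvOptMin]
    · simp only [hp, hq, Bool.true_or, if_true, if_false, Bool.false_eq_true]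
      cases pvFirstP q rest <;> simp [pvOptMin]
    · simp only [hp, hq, Bool.or_true, if_true, if_false, Bool.false_eq_true]
      cases pvFirstP p rest <;> simp [pvOptMin]
    · simp [hp, hq, ih, pvOptMin_map_succ]

-- the global scan: first category index matched by ANY label
def pvH (tl : List String) : Option Nat :=
  pvFirstP (fun c => tl.any (fun t => pvCatMatch (PySem.Str.upper t) c)) pvCats

theorem pvH_cons (t : String) (tl : List String) :
    pvH (t :: tl) = pvOptMin (pvFirstCat (PySem.Str.upper t) pvCats) (pvH tl) := by
  unfold pvH
  rw [pvFirstCat_eq_firstP, ← pvFirstP_disj]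
  congr 1

theorem pvFoldl_eq (tl : List String) (best : Option Nat) :
    tl.foldl pvStep best = pvOptMin best (pvH tl) := by
  induction tl generalizing best with
  | nil =>
    simp [pvH, pvFirstP, pvCats]
    cases best <;> rfl
  | cons t rest ih =>
    simp only [List.foldl_cons, ih, pvStep_eq, pvH_cons, pvOptMin_assoc]

theorem pvOptMin_none (b : Option Nat) : pvOptMin none b = b := rfl

-- ===== VERDICT (by name: the statement is the Claim_ definition above) =====
theorem classify_by_theme_labels_py_spec : Claim_equal_classify_by_theme_labels_py := by
  intro tl _
  unfold Spec_classify_by_theme_labels_py classify_by_theme_labels_py classify_by_theme_labels_py_alt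
  by_cases hnil : tl = []
  · simp [hnil]
  · simp only [hnil, if_false, pvFoldl_eq, pvOptMin_none]
    have hH : pvH tl =
        (if pvContainsAny (tl.map PySem.Str.upper) pvKwNat then some 0
         else if pvContainsAny (tl.map PySem.Str.upper) pvKwMil then some 1
         else if pvContainsAny (tl.map PySem.Str.upper) pvKwUnrest then some 2
         else if pvContainsAny (tl.map PySem.Str.upper) pvKwTerror then some 3
         else if pvContainsAny (tl.map PySem.Str.upper) pvKwPol then some 4
         else if pvContainsAny (tl.map PySem.Str.upper) pvKwEcon then some 5
         else none) := by
      unfold pvH pvCats pvContainsAny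
      simp only [pvFirstP, pvCatMatch, List.any_map, Function.comp_def]
      split_ifs <;> rfl
    simp only [pvContainsAny, List.any_map, Function.comp_def] at hH ⊢
    rw [hH]
    split_ifs <;> simp [PySem.List.pyGet?, PySem.List.pyIdx?, pvCats]
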